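-- pv_equiv track=rewrite | github.com/arunsinghthakur/jarvisx | packages/core/jarvisx/mcp/server_config.py | _add_npmrc_config
-- ===== SOURCE A (Python) =====
-- from typing import Any, Dict, List, Optional
--
-- def _add_npmrc_config(args: List[str], npmrc_path: str) -> List[str]:
--     new_args = []
--     userconfig_added = False
--     for arg in args:
--         new_args.append(arg)
--         if arg == "-y" and not userconfig_added:
--             new_args.extend(["--userconfig", npmrc_path])
--             userconfig_added = True
--     if not userconfig_added:
--         new_args = ["-y", "--userconfig", npmrc_path] + args
--     return new_args
-- ===== SOURCE B (Python) =====
-- from typing import List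
--
-- def _add_npmrc_config(args: List[str], npmrc_path: str) -> List[str]:
--     if "-y" in args:
--         i = args.index("-y")
--         return args[:i + 1] + ["--userconfig", npmrc_path] + args[i + 1:]
--     return ["-y", "--userconfig", npmrc_path] + args
-- ===== Notes on version B (the rewrite author's own statement) =====
-- stated objective: simpler
-- what changed: Replaces A's element-by-element copy loop with a sentinel flag by a locate-then-splice: find the first "-y" (if any) and splice the --userconfig pair in after it with slices.
import Mathlib
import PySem

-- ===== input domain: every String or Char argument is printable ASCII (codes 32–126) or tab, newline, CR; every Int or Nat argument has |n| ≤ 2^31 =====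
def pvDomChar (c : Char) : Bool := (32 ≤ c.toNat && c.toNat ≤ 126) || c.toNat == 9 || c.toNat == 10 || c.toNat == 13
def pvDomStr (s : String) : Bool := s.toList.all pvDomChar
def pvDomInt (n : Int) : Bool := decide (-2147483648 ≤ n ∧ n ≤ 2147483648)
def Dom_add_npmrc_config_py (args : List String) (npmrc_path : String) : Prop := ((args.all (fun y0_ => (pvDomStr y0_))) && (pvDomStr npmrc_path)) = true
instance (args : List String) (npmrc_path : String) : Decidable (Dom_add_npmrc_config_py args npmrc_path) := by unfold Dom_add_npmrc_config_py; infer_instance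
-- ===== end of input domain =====

-- B replaces A's element-by-element copy loop with a sentinel flag by a locate-then-splice (find the first "-y", splice the flag pair in after it); objective: simpler.


-- ===== PORT A =====
-- loop of A: threads (new_args, userconfig_added) through the args, in order
def addNpmrcLoop (p : String) : List String → List String → Bool → List String × Bool
  | [], acc, flag => (acc, flag)
  | a :: rest, acc, flag =>
    if a = "-y" ∧ flag = false then
      addNpmrcLoop p rest (acc ++ [a] ++ ["--userconfig", p]) true
    else
      addNpmrcLoop p rest (acc ++ [a]) flag

def add_npmrc_config_py (args : List String) (npmrc_path : String) : List String :=
  let r := addNpmrcLoop npmrc_path args [] false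
  if r.2 = false then ["-y", "--userconfig", npmrc_path] ++ args else r.1

-- ===== PORT B =====
-- B: locate the first "-y" and splice after it (args[:i+1] / args[i+1:] are take/drop, exact for 0 ≤ i < len)
def add_npmrc_config_py_alt (args : List String) (npmrc_path : String) : List String :=
  if args.contains "-y" then
    let i := args.idxOf "-y"
    args.take (i + 1) ++ ["--userconfig", npmrc_path] ++ args.drop (i + 1)
  else
    ["-y", "--userconfig", npmrc_path] ++ args

-- ===== PRECONDITION & SPEC =====
def Spec_add_npmrc_config_py (args : List String) (npmrc_path : String) (out : List String) : Prop := out = add_npmrc_config_py_alt args npmrc_path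
instance (args : List String) (npmrc_path : String) (out : List String) : Decidable (Spec_add_npmrc_config_py args npmrc_path out) := by unfold Spec_add_npmrc_config_py; infer_instance

-- ===== CLAIM (what is proved, stated in full; the proofs are below) =====
def Claim_equal_add_npmrc_config_py : Prop := ∀ (args : List String) (npmrc_path : String), Dom_add_npmrc_config_py args npmrc_path → Spec_add_npmrc_config_py args npmrc_path (add_npmrc_config_py args npmrc_path)

-- ===== LEMMAS AND PROOFS =====

lemma loop_true (p : String) (args acc : List String) :
    addNpmrcLoop p args acc true = (acc ++ args, true) := by
  induction args generalizing acc with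
  | nil => simp [addNpmrcLoop]
  | cons a rest ih => simp [addNpmrcLoop, ih]

lemma loop_no_y (p : String) (args acc : List String) (h : ¬ args.contains "-y") :
    addNpmrcLoop p args acc false = (acc ++ args, false) := by
  induction args generalizing acc with
  | nil => simp [addNpmrcLoop]
  | cons a rest ih =>
    simp only [List.contains_cons, Bool.or_eq_true, beq_iff_eq, not_or] at h
    have ha : ¬ a = "-y" := fun hy => h.1 hy.symm
    have hr : ¬ rest.contains "-y" := h.2
    simp [addNpmrcLoop, ha, ih _ hr]

lemma loop_y (p : String) (args acc : List String) (h : args.contains "-y") :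
    addNpmrcLoop p args acc false =
      (acc ++ args.take (args.idxOf "-y" + 1) ++ ["--userconfig", p] ++ args.drop (args.idxOf "-y" + 1), true) := by
  induction args generalizing acc with
  | nil => simp at h
  | cons a rest ih =>
    by_cases ha : a = "-y"
    · subst ha
      simp [addNpmrcLoop, List.idxOf_cons_self, loop_true]
    · have hr : rest.contains "-y" := by
        simp at h
        rcases h with h | h
        · exact absurd h.symm ha
        · simpa using h
      have hidx : (a :: rest).idxOf "-y" = rest.idxOf "-y" + 1 := by
        simp [ha]
      simp [addNpmrcLoop, ha, ih _ hr, hidx]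

-- ===== VERDICT (by name: the statement is the Claim_ definition above) =====
theorem add_npmrc_config_py_spec : Claim_equal_add_npmrc_config_py := by
  intro args npmrc_path _
  unfold Spec_add_npmrc_config_py add_npmrc_config_py add_npmrc_config_py_alt
  by_cases h : args.contains "-y"
  · have hm : "-y" ∈ args := by simpa using h
    simp [loop_y npmrc_path args [] h, hm]
  · have hm : "-y" ∉ args := by simpa using h
    simp [loop_no_y npmrc_path args [] h, hm]
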